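-- pv_equiv track=rewrite | github.com/AP-MI-2021/seminar-3-BogdanPos18 | main.py | celMaiMareNrDiv
-- ===== SOURCE A (Python) =====
-- def celMaiMareNrDiv(l, x):
--     '''
--     Determina cel mai mare nr dintr-o lista care este divizibil cu un nr dat
--     :param l: lista de float-uri
--     :param x: nr intreg
--     :return: cel mai mare nr din lista care este divizibil cu x
--     '''
--
--     ''' modul 1
--     max = None
--     for y in l:
--         if y % x and (max is None or y > max):
--             max = y
--     return max
--
--     modul 2
--     nrDivCuX = []
--     max = None
--     for y in l:
--         if y % x == 0:
--             nrDivCuX.append(y)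
--     for y in NrDivCuX:
--         if max is None or y > max:
--             max = y
--     return max
--     '''
--
--     reversedList = l[:]
--     reversedList.sort(reverse=True)
--     for y in reversedList:
--         if y % x == 0:
--             return y
-- ===== SOURCE B (Python) =====
-- def celMaiMareNrDiv(l, x):
--     best = None
--     for y in l:
--         if y % x == 0 and (best is None or y > best):
--             best = y
--     return best
-- ===== Notes on version B (the rewrite author's own statement) =====
-- stated objective: simpler
-- what changed: Replaces copy-then-sort-descending-then-scan-for-first-divisible with a single linear pass that keeps a running maximum of the divisible elements.
import Mathlib
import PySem

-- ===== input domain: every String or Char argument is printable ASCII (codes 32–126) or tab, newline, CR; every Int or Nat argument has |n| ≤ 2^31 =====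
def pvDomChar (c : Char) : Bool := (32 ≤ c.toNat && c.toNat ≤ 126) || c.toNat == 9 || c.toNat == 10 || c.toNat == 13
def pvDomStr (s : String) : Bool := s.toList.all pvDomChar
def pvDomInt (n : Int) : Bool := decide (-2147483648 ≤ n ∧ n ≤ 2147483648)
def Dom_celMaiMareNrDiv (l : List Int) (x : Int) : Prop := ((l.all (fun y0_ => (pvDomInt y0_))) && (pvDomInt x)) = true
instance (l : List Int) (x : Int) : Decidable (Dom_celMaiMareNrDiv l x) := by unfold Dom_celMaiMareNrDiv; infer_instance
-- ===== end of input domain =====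

-- B replaces copy/sort-descending/scan-for-first-divisible with one linear pass keeping a running max of divisible elements (simpler, no sort).
-- ===== PORT A =====
-- for-loop with early return over the descending-sorted copy
def pvALoop (x : Int) : List Int → Option Int
  | [] => none
  | y :: ys => if PySem.Int.mod y x = 0 then some y else pvALoop x ys

def celMaiMareNrDiv (l : List Int) (x : Int) : Option Int :=
  pvALoop x (PySem.List.sorted l (fun y => y) true)

-- ===== PORT B =====
-- 'if y % x == 0 and (best is None or y > best): best = y'
def pvBStep (x : Int) (best : Option Int) (y : Int) : Option Int :=
  match best with
  | none => if PySem.Int.mod y x = 0 then some y else none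
  | some m => if PySem.Int.mod y x = 0 ∧ m < y then some y else some m

def celMaiMareNrDiv_alt (l : List Int) (x : Int) : Option Int :=
  l.foldl (pvBStep x) none

-- ===== PRECONDITION & SPEC =====
-- Python's 'y % x' raises ZeroDivisionError when x = 0 and the list is nonempty (in both A and B); exactly those inputs are excluded.
def Pre_celMaiMareNrDiv (l : List Int) (x : Int) : Prop := x ≠ 0 ∨ l = []
instance (l : List Int) (x : Int) : Decidable (Pre_celMaiMareNrDiv l x) := by unfold Pre_celMaiMareNrDiv; infer_instance
def pvWitness_celMaiMareNrDiv : List Int × Int := ([6, 4, 9], 3)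

def Spec_celMaiMareNrDiv (l : List Int) (x : Int) (out : Option Int) : Prop := out = celMaiMareNrDiv_alt l x
instance (l : List Int) (x : Int) (out : Option Int) : Decidable (Spec_celMaiMareNrDiv l x out) := by unfold Spec_celMaiMareNrDiv; infer_instance

-- ===== CLAIM (what is proved, stated in full; the proofs are below) =====
def Claim_equal_celMaiMareNrDiv : Prop := ∀ (l : List Int) (x : Int), Dom_celMaiMareNrDiv l x → Pre_celMaiMareNrDiv l x → Spec_celMaiMareNrDiv l x (celMaiMareNrDiv l x)

-- ===== LEMMAS AND PROOFS =====

-- the common characterisation: the maximum of the x-divisible elements, none if there are none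
def pvMaxOfFilter (x : Int) (l : List Int) : Option Int :=
  match l.filter (fun y => PySem.Int.mod y x == 0) with
  | [] => none
  | a :: t => some (t.foldl max a)

theorem foldl_max_of_le (t : List Int) (m : Int) (h : ∀ z ∈ t, z ≤ m) : t.foldl max m = m := by
  induction t generalizing m with
  | nil => rfl
  | cons z t ih =>
      simp only [List.foldl_cons]
      rw [max_eq_left (h z (by simp))]
      exact ih m fun w hw => h w (by simp [hw])

theorem foldl_max_mem (a : Int) (t : List Int) : t.foldl max a ∈ a :: t := by
  induction t generalizing a with
  | nil => simp
  | cons z t ih =>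
      simp only [List.foldl_cons]
      rcases List.mem_cons.mp (ih (max a z)) with h | h
      · rcases max_choice a z with e | e <;> rw [e] at h ⊢ <;> simp [h]
      · simp [h]

theorem le_foldl_max (a : Int) (t : List Int) : ∀ z ∈ a :: t, z ≤ t.foldl max a := by
  induction t generalizing a with
  | nil => simp
  | cons w t ih =>
      intro z hz
      simp only [List.foldl_cons]
      rcases List.mem_cons.mp hz with rfl | hz'
      · exact le_trans (le_max_left z w) (ih (max z w) _ (by simp))
      · rcases List.mem_cons.mp hz' with rfl | hz''
        · exact le_trans (le_max_right a z) (ih (max a z) _ (by simp))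
        · exact ih (max a w) z (by simp [hz''])

theorem pvMaxOfFilter_perm (x : Int) (l₁ l₂ : List Int) (h : l₁.Perm l₂) :
    pvMaxOfFilter x l₁ = pvMaxOfFilter x l₂ := by
  have hf : (l₁.filter (fun y => PySem.Int.mod y x == 0)).Perm
      (l₂.filter (fun y => PySem.Int.mod y x == 0)) := h.filter _
  unfold pvMaxOfFilter
  rcases h1 : l₁.filter (fun y => PySem.Int.mod y x == 0) with _ | ⟨a, t⟩ <;>
    rcases h2 : l₂.filter (fun y => PySem.Int.mod y x == 0) with _ | ⟨b, u⟩
  · rfl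
  · rw [h1, h2] at hf; exact absurd hf.symm (by simp)
  · rw [h1, h2] at hf; exact absurd hf (by simp)
  · rw [h1, h2] at hf
    simp only
    congr 1
    have m1 := foldl_max_mem a t
    have m2 := foldl_max_mem b u
    exact le_antisymm (le_foldl_max b u _ (hf.mem_iff.mp m1))
      (le_foldl_max a t _ (hf.mem_iff.mpr m2))

theorem pvA_eq_maxFilter (x : Int) (s : List Int)
    (hs : s.Pairwise (fun a b => b ≤ a)) : pvALoop x s = pvMaxOfFilter x s := by
  induction s with
  | nil => rfl
  | cons y ys ih =>
      have hy : ∀ z ∈ ys, z ≤ y := (List.pairwise_cons.mp hs).1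
      have hys := (List.pairwise_cons.mp hs).2
      unfold pvALoop pvMaxOfFilter
      by_cases hp : PySem.Int.mod y x = 0
      · simp only [hp, if_true, List.filter_cons]
        simp only [beq_self_eq_true, if_true]
        rw [foldl_max_of_le _ y (fun z hz => hy z (List.mem_of_mem_filter hz))]
      · simp only [hp, if_false, List.filter_cons]
        simp only [show (PySem.Int.mod y x == 0) = false by simp [hp]]
        simpa [pvMaxOfFilter] using ih hys

theorem pvB_some_eq (x : Int) (l : List Int) (m : Int) :
    l.foldl (pvBStep x) (some m) =
      some ((l.filter (fun y => PySem.Int.mod y x == 0)).foldl max m) := by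
  induction l generalizing m with
  | nil => rfl
  | cons y t ih =>
      simp only [List.foldl_cons, List.filter_cons]
      by_cases hp : PySem.Int.mod y x = 0
      · simp only [show (PySem.Int.mod y x == 0) = true by simp [hp], if_true]
        by_cases hlt : m < y
        · simp only [pvBStep, hp, hlt, and_true, if_true, List.foldl_cons]
          rw [ih, max_eq_right (le_of_lt hlt)]
        · simp only [pvBStep, hp, hlt, and_false, if_false, List.foldl_cons]
          rw [ih, max_eq_left (le_of_not_gt hlt)]
      · simp only [show (PySem.Int.mod y x == 0) = false by simp [hp]]
        simp only [pvBStep, hp, false_and, if_false]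
        exact ih m
    
theorem pvB_eq_maxFilter (x : Int) (l : List Int) :
    l.foldl (pvBStep x) none = pvMaxOfFilter x l := by
  induction l with
  | nil => rfl
  | cons y t ih =>
      simp only [List.foldl_cons]
      unfold pvMaxOfFilter
      by_cases hp : PySem.Int.mod y x = 0
      · simp only [pvBStep, hp, if_true, List.filter_cons, beq_self_eq_true]
        exact pvB_some_eq x t y
      · simp only [pvBStep, hp, if_false, List.filter_cons]
        simp only [show (PySem.Int.mod y x == 0) = false by simp [hp]]
        simpa [pvMaxOfFilter] using ih

-- ===== VERDICT (by name: the statement is the Claim_ definition above) =====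
theorem celMaiMareNrDiv_spec : Claim_equal_celMaiMareNrDiv := by
  intro l x _ _
  unfold Spec_celMaiMareNrDiv celMaiMareNrDiv celMaiMareNrDiv_alt
  rw [pvB_eq_maxFilter, pvA_eq_maxFilter x _ (PySem.List.sorted_pairwise_rev l (fun y => y)),
    pvMaxOfFilter_perm x _ _ (PySem.List.sorted_perm l (fun y => y) true)]
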